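-- pv_equiv track=rewrite | github.com/Tbilgere/killer_sudoku_cell_lister | killer_sudoku_cell_lister.py | search_cells
-- ===== SOURCE A (Python) =====
-- def search_cells(cells, target, size=0):
--      return_list = []
--      if size == 0:
--          size = len(cells)
--      cell = cells[0]
--      remaining_cells = []
--      if len(cells) > 1:
--          remaining_cells = cells.copy()
--          remaining_cells.remove(cell)
--      for value in cell:
--          remain_tar = target - value
--          if remaining_cells:
--              other_vals = search_cells(remaining_cells, remain_tar, size)
--              if other_vals:
--                  for other_val in other_vals:
--                      if len(other_val) != size:
--                          other_val.append(value)
--                      return_list.append(other_val)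
--          elif remain_tar == 0:
--              return_list.append([value])
--      return return_list
-- ===== SOURCE B (Python) =====
-- def search_cells(cells, target, size=0):
--     n = len(cells)
--     k = size if 1 <= size <= n else n
--     # suffix min/max sums: bounds[i] = (min, max) achievable over cells[i:]; used to prune dead subtrees
--     bounds = [(0, 0)]
--     for cell in reversed(cells):
--         if not cell:
--             return []
--         lo, hi = bounds[0]
--         bounds.insert(0, (lo + min(cell), hi + max(cell)))
--     out = []
--
--     def dfs(i, rem, acc):
--         lo, hi = bounds[i]
--         if rem < lo or hi < rem:
--             return
--         if i == n:
--             out.append(acc)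
--             return
--         for v in cells[i]:
--             dfs(i + 1, rem - v, [v] + acc if n - i <= k else acc)
--
--     dfs(0, target, [])
--     return out
-- ===== Notes on version B (the rewrite author's own statement) =====
-- stated objective: alternative
-- what changed: A enumerates the full Cartesian product of the cells by naive recursion on the remaining cells; B precomputes suffix min/max sums once and runs a branch-and-bound DFS that skips subtrees whose residual target is outside the reachable range (a genuinely different traversal; not measurably faster on the random timing inputs, where targets are almost always reachable).
import Mathlib
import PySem

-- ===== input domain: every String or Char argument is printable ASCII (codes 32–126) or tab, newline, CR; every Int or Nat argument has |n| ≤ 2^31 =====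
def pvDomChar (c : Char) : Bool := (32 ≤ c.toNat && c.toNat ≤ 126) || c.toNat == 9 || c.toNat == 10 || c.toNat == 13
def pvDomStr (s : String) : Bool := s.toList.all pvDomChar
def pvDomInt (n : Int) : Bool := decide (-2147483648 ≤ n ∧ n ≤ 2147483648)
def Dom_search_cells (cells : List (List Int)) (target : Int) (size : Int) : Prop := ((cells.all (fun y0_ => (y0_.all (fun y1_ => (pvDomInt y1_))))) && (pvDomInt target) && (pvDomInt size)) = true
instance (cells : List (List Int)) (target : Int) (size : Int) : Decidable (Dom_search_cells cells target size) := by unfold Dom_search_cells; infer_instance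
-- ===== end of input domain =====

-- B replaces A's unpruned Cartesian recursion by a branch-and-bound DFS over precomputed
-- suffix min/max sums, skipping subtrees whose residual target is unreachable (an
-- alternative algorithm of the same worst-case cost; no speed claim).

-- ===== PORT A =====
-- Literal port of A. On cells = [] Python raises IndexError (cells[0]); excluded by Pre_.
def search_cells (cells : List (List Int)) (target : Int) (size0 : Int) : List (List Int) :=
  match cells with
  | [] => []
  | cell :: rest =>
    let size : Int := if size0 = 0 then ((cell :: rest).length : Int) else size0
    cell.foldl (fun return_list value =>
      let remain_tar := target - value
      if rest ≠ [] then
        return_list ++ (search_cells rest remain_tar size).map (fun other_val =>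
          if (other_val.length : Int) ≠ size then other_val ++ [value] else other_val)
      else if remain_tar = 0 then return_list ++ [[value]]
      else return_list) []

-- ===== PORT B =====
-- suffix (min,max) sums, innermost first; none = some cell is empty (B returns [] early)
def altBounds : List (List Int) → Option (List (Int × Int))
  | [] => some [(0, 0)]
  | c :: rest =>
    match altBounds rest with
    | none => none
    | some bs =>
      match PySem.List.min? c (fun x => x), PySem.List.max? c (fun x => x), bs with
      | some mn, some mx, (l, h) :: _ => some ((l + mn, h + mx) :: bs)
      | _, _, _ => none

def altDfs (k : Nat) : List (List Int) → List (Int × Int) → Int → List Int → List (List Int)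
  | [], bounds, rem, acc =>
    match bounds with
    | [] => []
    | (l, h) :: _ => if rem < l ∨ h < rem then [] else [acc]
  | c :: rest, bounds, rem, acc =>
    match bounds with
    | [] => []
    | (l, h) :: bs =>
      if rem < l ∨ h < rem then []
      else c.flatMap fun v =>
        altDfs k rest bs (rem - v) (if rest.length + 1 ≤ k then v :: acc else acc)

def search_cells_alt (cells : List (List Int)) (target : Int) (size : Int) : List (List Int) :=
  let n := cells.length
  let k : Nat := if 1 ≤ size ∧ size ≤ (n : Int) then size.toNat else n
  match altBounds cells with
  | none => []
  | some bounds => altDfs k cells bounds target []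

-- ===== PRECONDITION & SPEC =====
-- Python A evaluates cells[0] and raises IndexError on an empty cells list; excluded.
def Pre_search_cells (cells : List (List Int)) (target : Int) (size : Int) : Prop := cells ≠ []
instance (cells : List (List Int)) (target : Int) (size : Int) : Decidable (Pre_search_cells cells target size) := by unfold Pre_search_cells; infer_instance
def pvWitness_search_cells : List (List Int) × Int × Int := ([[1, 2], [2]], 3, 0)

def Spec_search_cells (cells : List (List Int)) (target : Int) (size : Int) (out : List (List Int)) : Prop := out = search_cells_alt cells target size
instance (cells : List (List Int)) (target : Int) (size : Int) (out : List (List Int)) : Decidable (Spec_search_cells cells target size out) := by unfold Spec_search_cells; infer_instance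

-- ===== CLAIM (what is proved, stated in full; the proofs are below) =====
def Claim_equal_search_cells : Prop := ∀ (cells : List (List Int)) (target : Int) (size : Int), Dom_search_cells cells target size → Pre_search_cells cells target size → Spec_search_cells cells target size (search_cells cells target size)

-- ===== LEMMAS AND PROOFS =====

-- unpruned enumerator in B's shape (prepend-into-acc, global keep-count k)
def enumK (k : Nat) : List (List Int) → Int → List Int → List (List Int)
  | [], rem, acc => if rem = 0 then [acc] else []
  | c :: rest, rem, acc => c.flatMap fun v =>
      enumK k rest (rem - v) (if rest.length + 1 ≤ k then v :: acc else acc)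

-- unpruned enumerator in A's shape (append value behind recursive results)
def enumA (s : Int) : List (List Int) → Int → List (List Int)
  | [], rem => if rem = 0 then [[]] else []
  | c :: rest, rem => c.flatMap fun v =>
      (enumA s rest (rem - v)).map fun ov =>
        if (ov.length : Int) ≠ s then ov ++ [v] else ov

def LOf (n : Nat) (s : Int) : Int := if 1 ≤ s ∧ s ≤ (n : Int) then s else (n : Int)
def kOf (n : Nat) (s : Int) : Nat := if 1 ≤ s ∧ s ≤ (n : Int) then s.toNat else n

theorem foldl_ite_append {α β : Type} (p : α → Prop) [DecidablePred p] (f : α → List β)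
    (l : List α) (acc : List β) :
    l.foldl (fun a x => if p x then a ++ f x else a) acc
      = acc ++ l.flatMap (fun x => if p x then f x else []) := by
  have h : (fun (a : List β) (x : α) => if p x then a ++ f x else a)
      = (fun a x => a ++ if p x then f x else []) := by
    funext a x; split_ifs <;> simp
  rw [h, PySem.List.foldl_append_eq_flatMap]

theorem searchA_eq_enumA (s : Int) (hs : s ≠ 0) :
    ∀ cells : List (List Int), cells ≠ [] → ∀ rem, search_cells cells rem s = enumA s cells rem := by
  intro cells
  induction cells with
  | nil => intro h; exact absurd rfl h
  | cons c rest ih =>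
    intro _ rem
    rw [search_cells, enumA]
    simp only [if_neg hs]
    by_cases hr : rest = []
    · subst hr
      simp only [ne_eq, not_true_eq_false, if_false, reduceIte]
      rw [foldl_ite_append (fun v => rem - v = 0) (fun v => [[v]])]
      simp only [List.nil_append, enumA]
      congr 1; funext v
      by_cases h0 : rem - v = 0 <;> simp [h0, Ne.symm hs]
    · simp only [hr, ne_eq, not_false_eq_true, if_true, reduceIte]
      rw [PySem.List.foldl_append_eq_flatMap]
      simp only [List.nil_append]
      congr 1
      funext v
      rw [ih hr]

theorem enumA_length (s : Int) (hs : s ≠ 0) :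
    ∀ (cells : List (List Int)) (rem : Int), ∀ ov ∈ enumA s cells rem,
      (ov.length : Int) = LOf cells.length s := by
  intro cells
  induction cells with
  | nil =>
    intro rem ov hov
    rw [enumA] at hov
    by_cases h0 : rem = 0
    · simp only [h0, if_pos] at hov
      simp only [List.mem_singleton] at hov
      subst hov
      unfold LOf
      simp only [List.length_nil, Nat.cast_zero]
      split_ifs <;> omega
    · simp [h0] at hov
  | cons c rest ih =>
    intro rem ov hov
    rw [enumA] at hov
    simp only [List.mem_flatMap, List.mem_map] at hov
    obtain ⟨v, hv, ov', hov', rfl⟩ := hov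
    have h := ih (rem - v) ov' hov'
    by_cases hg : (ov'.length : Int) ≠ s
    · rw [if_pos hg]
      simp only [List.length_append, List.length_cons, List.length_nil]
      unfold LOf at *
      split_ifs at * <;> push_cast at * <;> omega
    · rw [if_neg hg]
      push_neg at hg
      simp only [List.length_cons]
      unfold LOf at *
      split_ifs at * <;> push_cast at * <;> omega

theorem keep_iff (s : Int) (hs : s ≠ 0) (n m : Nat) (hm : m + 1 ≤ n) :
    (m + 1 ≤ kOf n s) ↔ LOf m s ≠ s := by
  unfold kOf LOf; split_ifs <;> omega

theorem enumK_eq_enumA (s : Int) (hs : s ≠ 0) (n : Nat) :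
    ∀ (cells : List (List Int)), cells.length ≤ n → ∀ rem acc,
      enumK (kOf n s) cells rem acc = (enumA s cells rem).map (· ++ acc) := by
  intro cells
  induction cells with
  | nil => intro _ rem acc; rw [enumK, enumA]; by_cases h0 : rem = 0 <;> simp [h0]
  | cons c rest ih =>
    intro hlen rem acc
    have hlen' : rest.length ≤ n := by simp at hlen; omega
    have hm : rest.length + 1 ≤ n := by simpa using hlen
    rw [enumK, enumA, List.map_flatMap]
    congr 1; funext v
    rw [ih hlen', List.map_map]
    apply List.map_congr_left
    intro ov hov
    have hl := enumA_length s hs rest (rem - v) ov hov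
    by_cases hc : rest.length + 1 ≤ kOf n s
    · rw [if_pos hc]
      have : (ov.length : Int) ≠ s := by rw [hl]; exact (keep_iff s hs n rest.length hm).mp hc
      simp only [Function.comp_apply, if_pos this]
      simp
    · rw [if_neg hc]
      have : ¬ ((ov.length : Int) ≠ s) := by
        rw [hl]
        intro hne
        exact hc ((keep_iff s hs n rest.length hm).mpr hne)
      simp only [Function.comp_apply, if_neg this]

theorem altBounds_length :
    ∀ (cells : List (List Int)) (bs : List (Int × Int)), altBounds cells = some bs →
      bs.length = cells.length + 1 := by
  intro cells
  induction cells with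
  | nil =>
    intro bs h
    rw [altBounds] at h
    injection h with h
    subst h; rfl
  | cons c rest ih =>
    intro bs h
    rw [altBounds] at h
    cases hb : altBounds rest with
    | none => rw [hb] at h; cases h
    | some bs' =>
      rw [hb] at h
      cases hmn : PySem.List.min? c (fun x => x) with
      | none => rw [hmn] at h; cases h
      | some mn =>
        cases hmx : PySem.List.max? c (fun x => x) with
        | none => rw [hmn, hmx] at h; cases h
        | some mx =>
          rw [hmn, hmx] at h
          cases bs' with
          | nil => cases h
          | cons p t =>
            obtain ⟨l, hh⟩ := p
            injection h with h
            subst h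
            simp only [List.length_cons]
            have := ih (⟨l, hh⟩ :: t) hb
            simp only [List.length_cons] at this ⊢
            omega

theorem enumK_nil_of_none (k : Nat) :
    ∀ (cells : List (List Int)), altBounds cells = none → ∀ rem acc, enumK k cells rem acc = [] := by
  intro cells
  induction cells with
  | nil => intro h; rw [altBounds] at h; cases h
  | cons c rest ih =>
    intro h rem acc
    rw [altBounds] at h
    rw [enumK]
    cases hb : altBounds rest with
    | none =>
      simp only [List.flatMap_eq_nil_iff]
      intro v _
      exact ih hb _ _
    | some bs' =>
      rw [hb] at h
      cases hmn : PySem.List.min? c (fun x => x) with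
      | none =>
        have hc : c = [] := (PySem.List.min?_eq_none_iff c (fun x => x)).mp hmn
        subst hc; rfl
      | some mn =>
        cases hmx : PySem.List.max? c (fun x => x) with
        | none =>
          have hc : c = [] := (PySem.List.max?_eq_none_iff c (fun x => x)).mp hmx
          subst hc; rfl
        | some mx =>
          rw [hmn, hmx] at h
          cases bs' with
          | nil =>
            have := altBounds_length rest [] hb
            simp at this
          | cons p t => cases h

theorem enumK_nil_of_prune (k : Nat) :
    ∀ (cells : List (List Int)) (l h : Int) (bs : List (Int × Int)),
      altBounds cells = some ((l, h) :: bs) → ∀ rem, (rem < l ∨ h < rem) →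
      ∀ acc, enumK k cells rem acc = [] := by
  intro cells
  induction cells with
  | nil =>
    intro l h bs hb rem hrem acc
    rw [altBounds] at hb
    injection hb with hb
    injection hb with hb1 hb2
    injection hb1 with e1 e2
    subst e1; subst e2
    rw [enumK, if_neg (by omega)]
  | cons c rest ih =>
    intro l h bs hb rem hrem acc
    rw [altBounds] at hb
    cases hbr : altBounds rest with
    | none => rw [hbr] at hb; cases hb
    | some bs' =>
      rw [hbr] at hb
      cases hmn : PySem.List.min? c (fun x => x) with
      | none =>
        have hc : c = [] := (PySem.List.min?_eq_none_iff c (fun x => x)).mp hmn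
        subst hc; rfl
      | some mn =>
        cases hmx : PySem.List.max? c (fun x => x) with
        | none =>
          have hc : c = [] := (PySem.List.max?_eq_none_iff c (fun x => x)).mp hmx
          subst hc; rfl
        | some mx =>
          rw [hmn, hmx] at hb
          cases bs' with
          | nil => cases hb
          | cons p t =>
            obtain ⟨l', h'⟩ := p
            injection hb with hb
            injection hb with hb1 hb2
            injection hb1 with e1 e2
            subst e1; subst e2
            rw [enumK]
            simp only [List.flatMap_eq_nil_iff]
            intro v hv
            have h1 := PySem.List.min?_isMin hmn v hv
            have h2 := PySem.List.max?_isMax hmx v hv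
            simp only [] at h1 h2
            exact ih l' h' t hbr (rem - v) (by omega) _

theorem altDfs_eq_enumK (k : Nat) :
    ∀ (cells : List (List Int)) (bounds : List (Int × Int)), altBounds cells = some bounds →
      ∀ rem acc, altDfs k cells bounds rem acc = enumK k cells rem acc := by
  intro cells
  induction cells with
  | nil =>
    intro bounds hb rem acc
    rw [altBounds] at hb
    injection hb with hb
    subst hb
    rw [altDfs, enumK]
    by_cases h0 : rem = 0
    · subst h0; norm_num
    · rw [if_pos (by omega), if_neg h0]
  | cons c rest ih =>
    intro bounds hb rem acc
    rw [altBounds] at hb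
    cases hbr : altBounds rest with
    | none => rw [hbr] at hb; cases hb
    | some bs' =>
      rw [hbr] at hb
      cases hmn : PySem.List.min? c (fun x => x) with
      | none => rw [hmn] at hb; cases hb
      | some mn =>
        cases hmx : PySem.List.max? c (fun x => x) with
        | none => rw [hmn, hmx] at hb; cases hb
        | some mx =>
          rw [hmn, hmx] at hb
          cases bs' with
          | nil => cases hb
          | cons p t =>
            obtain ⟨l', h'⟩ := p
            injection hb with hb
            subst hb
            rw [altDfs]
            by_cases hp : rem < l' + mn ∨ h' + mx < rem
            · rw [if_pos hp]
              have hfull : altBounds (c :: rest) = some ((l' + mn, h' + mx) :: (l', h') :: t) := by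
                rw [altBounds, hbr, hmn, hmx]
              exact (enumK_nil_of_prune k (c :: rest) (l' + mn) (h' + mx) ((l', h') :: t)
                hfull rem hp acc).symm
            · rw [if_neg hp, enumK]
              congr 1; funext v
              exact ih ((l', h') :: t) hbr (rem - v) _

-- ===== VERDICT (by name: the statement is the Claim_ definition above) =====
theorem searchA_zero (cells : List (List Int)) (target : Int) :
    search_cells cells target 0 = search_cells cells target (cells.length : Int) := by
  cases cells with
  | nil => rfl
  | cons c rest =>
    have h1 : (if (0 : Int) = 0 then (((c :: rest).length : Nat) : Int) else 0)
        = (((c :: rest).length : Nat) : Int) := by simp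
    have h2 : (if (((c :: rest).length : Nat) : Int) = 0 then (((c :: rest).length : Nat) : Int)
        else (((c :: rest).length : Nat) : Int)) = (((c :: rest).length : Nat) : Int) := ite_self _
    rw [search_cells, search_cells, h1, h2]

theorem alt_eq_enumK (cells : List (List Int)) (target : Int) (size : Int) :
    search_cells_alt cells target size
      = enumK (if 1 ≤ size ∧ size ≤ (cells.length : Int) then size.toNat else cells.length)
          cells target [] := by
  unfold search_cells_alt
  cases hb : altBounds cells with
  | none =>
    simp only [hb]
    exact (enumK_nil_of_none _ cells hb target []).symm
  | some bounds =>
    simp only [hb]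
    exact altDfs_eq_enumK _ cells bounds hb target []

theorem search_cells_spec : Claim_equal_search_cells := by
  unfold Claim_equal_search_cells
  intro cells target size _ hpre
  unfold Spec_search_cells
  unfold Pre_search_cells at hpre
  have hn1 : 1 ≤ cells.length := by
    cases cells with
    | nil => exact absurd rfl hpre
    | cons a b => simp
  have key : ∀ s : Int, s ≠ 0 → search_cells cells target s
      = enumK (kOf cells.length s) cells target [] := by
    intro s hs
    rw [searchA_eq_enumA s hs cells hpre target]
    have h2 := enumK_eq_enumA s hs cells.length cells (le_refl _) target []
    simpa using h2.symm
  rw [alt_eq_enumK]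
  by_cases h0 : size = 0
  · subst h0
    have hz : (cells.length : Int) ≠ 0 := by
      intro h; omega
    rw [searchA_zero cells target, key (cells.length : Int) hz]
    congr 1
    unfold kOf
    split_ifs <;> omega
  · rw [key size h0]
    congr 1
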